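-- pv_equiv track=rewrite | github.com/maengjh0208/algorithm_coding_test | home_1.py | solution
-- ===== SOURCE A (Python) =====
-- def solution(arr: list) -> int:
--     def check(i: int, j: int):
--         check_count = 0
--         # i행 확인
--         for idx in range(N):
--             if arr[i][idx] == "B":
--                 check_count += 1
--                 board[i][idx] = 0
--
--         # j열 확인
--         for idx in range(M):
--             if arr[idx][j] == "B":
--                 check_count += 1
--                 board[idx][j] = 0
--
--         return check_count == 2
--
--     # (arr 2차원 배열) M: 행 개수 / N: 열 개수
--     M = len(arr)
--     N = len(arr[0])
--
--     board = [[1] * N for _ in range(M)]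
--
--     count = 0
--     for i in range(M):
--         for j in range(N):
--             if arr[i][j] == "B" and board[i][j] and check(i, j):
--                 count += 1
--
--     return count
-- ===== SOURCE B (Python) =====
-- def solution(arr: list) -> int:
--     n = len(arr[0])
--     res = 0
--     for row in arr:
--         head = row[:n]
--         if head.count("B") == 1:
--             j = head.index("B")
--             if sum(1 for r in arr if r[j] == "B") == 1:
--                 res += 1
--     return res
-- ===== Notes on version B (the rewrite author's own statement) =====
-- stated objective: alternative
-- what changed: Drops the mutable crossing-off board and the per-cell row+column rescans: each row's B's are counted once with a slice count, and only a row holding exactly one B triggers a single column-count check at its B's index.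
import Mathlib
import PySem

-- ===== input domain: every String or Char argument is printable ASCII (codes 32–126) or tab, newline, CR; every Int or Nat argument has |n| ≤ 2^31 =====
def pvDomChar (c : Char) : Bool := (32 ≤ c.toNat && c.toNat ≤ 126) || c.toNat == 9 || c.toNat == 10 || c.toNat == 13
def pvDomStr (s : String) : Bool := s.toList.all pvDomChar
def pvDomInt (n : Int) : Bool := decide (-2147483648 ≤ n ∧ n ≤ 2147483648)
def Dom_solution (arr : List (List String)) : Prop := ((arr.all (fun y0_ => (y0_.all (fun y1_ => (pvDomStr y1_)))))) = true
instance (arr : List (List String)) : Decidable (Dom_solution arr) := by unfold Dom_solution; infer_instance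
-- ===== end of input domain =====

-- B replaces A's mutable crossing-off board and per-cell row+column rescan: it counts each row's B's
-- once and checks the single column count only for rows holding exactly one B (alternative algorithm).


-- ===== PORT A =====
-- board[i][j] read / write (indices in range under Pre_solution)
def pvBGet (b : List (List Int)) (i j : Nat) : Int := (b.getD i []).getD j 0
def pvBSet (b : List (List Int)) (i j : Nat) (v : Int) : List (List Int) :=
  b.set i ((b.getD i []).set j v)

-- the inner function `check(i, j)`: returns the mutated board and `check_count == 2`
def pvCheck (arr : List (List String)) (M N i j : Nat) (board : List (List Int)) :
    List (List Int) × Bool :=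
  let st1 := (List.range N).foldl (fun (st : Int × List (List Int)) idx =>
      if (arr.getD i []).getD idx "" == "B" then (st.1 + 1, pvBSet st.2 i idx 0) else st)
    ((0 : Int), board)
  let st2 := (List.range M).foldl (fun (st : Int × List (List Int)) idx =>
      if (arr.getD idx []).getD j "" == "B" then (st.1 + 1, pvBSet st.2 idx j 0) else st) st1
  (st2.2, st2.1 == 2)

def solution (arr : List (List String)) : Int :=
  let M := arr.length
  let N := (arr.headD []).length
  let board : List (List Int) := List.replicate M (List.replicate N 1)
  let res := (List.range M).foldl (fun st i =>
      (List.range N).foldl (fun (st : List (List Int) × Int) j =>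
        if ((arr.getD i []).getD j "" == "B") && (pvBGet st.1 i j != 0) then
          let c := pvCheck arr M N i j st.1
          if c.2 then (c.1, st.2 + 1) else (c.1, st.2)
        else st) st) (board, (0 : Int))
  res.2

-- ===== PORT B =====
def solution_alt (arr : List (List String)) : Int :=
  let n := (arr.headD []).length
  arr.foldl (fun (res : Int) row =>
    let head := PySem.List.slice row none (some ((n : Nat) : Int))
    if ((PySem.List.count head "B" : Nat) : Int) == 1 then
      match PySem.List.index? head "B" with
      | some j =>
        if (arr.foldl (fun (s : Int) r =>
            if r.getD j "" == "B" then s + 1 else s) 0) == 1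
        then res + 1 else res
      | none => res  -- head.index("B"): unreachable, head holds exactly one "B"
    else res) 0

-- ===== PRECONDITION & SPEC =====
-- Exactly the inputs on which A returns: A raises IndexError on the empty list (arr[0]) and
-- whenever some row is shorter than the first row (it reads arr[i][j] for every j < len(arr[0])).
def Pre_solution (arr : List (List String)) : Prop :=
  arr ≠ [] ∧ ∀ row ∈ arr, (arr.headD []).length ≤ row.length
instance (arr : List (List String)) : Decidable (Pre_solution arr) := by
  unfold Pre_solution; infer_instance

def pvWitness_solution : List (List String) := [["B", "A"], ["A", "B"]]

def Spec_solution (arr : List (List String)) (out : Int) : Prop := out = solution_alt arr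
instance (arr : List (List String)) (out : Int) : Decidable (Spec_solution arr out) := by
  unfold Spec_solution; infer_instance

-- ===== CLAIM (what is proved, stated in full; the proofs are below) =====
def Claim_equal_solution : Prop :=
  ∀ (arr : List (List String)), Dom_solution arr → Pre_solution arr →
    Spec_solution arr (solution arr)

-- ===== LEMMAS AND PROOFS =====

-- proof-side vocabulary ------------------------------------------------------
def pvG (arr : List (List String)) (i j : Nat) : String := (arr.getD i []).getD j ""
def pvIsB (arr : List (List String)) (i j : Nat) : Bool := pvG arr i j == "B"
def pvRCnt (arr : List (List String)) (N i : Nat) : Nat :=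
  (List.range N).countP (fun q => pvIsB arr i q)
def pvCCnt (arr : List (List String)) (M j : Nat) : Nat :=
  (List.range M).countP (fun p => pvIsB arr p j)
def pvUniq (arr : List (List String)) (M N : Nat) (c : Nat × Nat) : Bool :=
  pvIsB arr c.1 c.2 && (pvRCnt arr N c.1 == 1) && (pvCCnt arr M c.2 == 1)
def pvShape (M N : Nat) (b : List (List Int)) : Prop :=
  b.length = M ∧ ∀ r ∈ b, r.length = N
def pvCells (M N : Nat) : List (Nat × Nat) :=
  (List.range M).flatMap (fun i => (List.range N).map (fun j => (i, j)))
def pvStep (arr : List (List String)) (M N : Nat)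
    (st : List (List Int) × Int) (c : Nat × Nat) : List (List Int) × Int :=
  if ((arr.getD c.1 []).getD c.2 "" == "B") && (pvBGet st.1 c.1 c.2 != 0) then
    let r := pvCheck arr M N c.1 c.2 st.1
    if r.2 then (r.1, st.2 + 1) else (r.1, st.2)
  else st


-- generic list facts specialised to this file ---------------------------------
lemma pv_map_getD_range {α : Type} (l : List α) (d : α) :
    (List.range l.length).map (fun q => l.getD q d) = l := by
  apply List.ext_getElem
  · simp
  · intro i h1 h2
    simp [List.getD_eq_getElem?_getD, List.getElem?_eq_getElem h2]

lemma pv_countP_range_getD {α : Type} (l : List α) (p : α → Bool) (d : α) :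
    (List.range l.length).countP (fun q => p (l.getD q d)) = l.countP p := by
  conv_rhs => rw [← pv_map_getD_range l d]
  rw [List.countP_map]; rfl

lemma pv_two_le_countP (p : Nat → Bool) (n a b : Nat) (ha : a < n) (hb : b < n)
    (hne : a ≠ b) (hpa : p a = true) (hpb : p b = true) :
    2 ≤ (List.range n).countP p := by
  rw [List.countP_eq_length_filter]
  have hma : a ∈ (List.range n).filter p := by
    simp [List.mem_filter, List.mem_range, ha, hpa]
  have hmb : b ∈ ((List.range n).filter p).erase a := by
    rw [List.mem_erase_of_ne (Ne.symm hne)]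
    simp [List.mem_filter, List.mem_range, hb, hpb]
  have h1 : 0 < (((List.range n).filter p).erase a).length := List.length_pos_of_mem hmb
  have h2 := List.length_erase_of_mem hma
  omega

-- board get/set ----------------------------------------------------------------
lemma pv_getD_set {α : Type} (l : List α) (i j : Nat) (v d : α) :
    (l.set i v).getD j d = if i = j ∧ i < l.length then v else l.getD j d := by
  simp only [List.getD_eq_getElem?_getD, List.getElem?_set]
  split_ifs with h1 h2 h3 h3 <;> simp_all <;> omega

lemma pv_bget_bset (b : List (List Int)) (i j p q : Nat) (v : Int) :
    pvBGet (pvBSet b i j v) p q =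
      if i = p ∧ i < b.length ∧ j = q ∧ j < (b.getD i []).length then v
      else pvBGet b p q := by
  unfold pvBGet pvBSet
  rw [pv_getD_set]
  by_cases hip : i = p
  · subst hip
    by_cases hil : i < b.length
    · rw [if_pos (show i = i ∧ i < b.length from ⟨rfl, hil⟩), pv_getD_set]
      split_ifs with h1 h2 h2 <;>
        simp_all [List.getD_eq_getElem?_getD, List.getElem?_eq_getElem hil] <;> omega
    · simp [hil]
  · simp [hip]

lemma pv_shape_bset {M N : Nat} {b : List (List Int)} (h : pvShape M N b)
    (i j : Nat) (v : Int) : pvShape M N (pvBSet b i j v) := by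
  obtain ⟨hl, hr⟩ := h
  by_cases hi : i < b.length
  · refine ⟨by simpa [pvBSet] using hl, ?_⟩
    intro r hrm
    rcases List.mem_or_eq_of_mem_set hrm with hm | he
    · exact hr r hm
    · subst he
      have hmem : b.getD i [] ∈ b := by
        rw [List.getD_eq_getElem?_getD, List.getElem?_eq_getElem hi]
        exact List.getElem_mem hi
      simpa using hr _ hmem
  · unfold pvBSet
    rw [List.set_eq_of_length_le (by omega)]
    exact ⟨hl, hr⟩

-- pair-fold projections --------------------------------------------------------
lemma pv_foldl_pair_fst {β γ : Type} (p : β → Bool) (h : γ → β → γ) :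
    ∀ (l : List β) (st : Int × γ),
      (l.foldl (fun st x => if p x then (st.1 + 1, h st.2 x) else st) st).1 =
        st.1 + l.countP p := by
  intro l
  induction l with
  | nil => intro st; simp
  | cons x l ih =>
    intro st
    by_cases hx : p x = true <;>
      simp [List.countP_cons, hx, ih] <;> ring

lemma pv_foldl_pair_snd {β γ : Type} (p : β → Bool) (h : γ → β → γ) :
    ∀ (l : List β) (st : Int × γ),
      (l.foldl (fun st x => if p x then (st.1 + 1, h st.2 x) else st) st).2 =
        l.foldl (fun b x => if p x then h b x else b) st.2 := by
  intro l
  induction l with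
  | nil => intro st; simp
  | cons x l ih =>
    intro st
    by_cases hx : p x = true <;> simp [hx, ih]


-- zero propagation through the two crossing-off folds --------------------------
lemma pv_zrow_zero (pp : Nat → Bool) (i p q : Nat) :
    ∀ (l : List Nat) (b : List (List Int)),
      pvBGet (l.foldl (fun b idx => if pp idx then pvBSet b i idx 0 else b) b) p q = 0 →
      pvBGet b p q = 0 ∨ (p = i ∧ pp q = true) := by
  intro l
  induction l with
  | nil => intro b h; exact Or.inl h
  | cons x l ih =>
    intro b h
    rcases ih _ h with h0 | hr
    · by_cases hx : pp x = true
      · simp only [hx, if_true] at h0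
        rw [pv_bget_bset] at h0
        split_ifs at h0 with hc
        · exact Or.inr ⟨hc.1.symm ▸ rfl, by
            obtain ⟨h1, _, h3, _⟩ := hc
            subst h1; subst h3; exact hx⟩
        · exact Or.inl h0
      · simp only [hx, if_false] at h0
        exact Or.inl h0
    · exact Or.inr hr

lemma pv_zcol_zero (pp : Nat → Bool) (j p q : Nat) :
    ∀ (l : List Nat) (b : List (List Int)),
      pvBGet (l.foldl (fun b idx => if pp idx then pvBSet b idx j 0 else b) b) p q = 0 →
      pvBGet b p q = 0 ∨ (q = j ∧ pp p = true) := by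
  intro l
  induction l with
  | nil => intro b h; exact Or.inl h
  | cons x l ih =>
    intro b h
    rcases ih _ h with h0 | hr
    · by_cases hx : pp x = true
      · simp only [hx, if_true] at h0
        rw [pv_bget_bset] at h0
        split_ifs at h0 with hc
        · exact Or.inr ⟨hc.2.2.1.symm ▸ rfl, by
            obtain ⟨h1, _, h3, _⟩ := hc
            subst h1; subst h3; exact hx⟩
        · exact Or.inl h0
      · simp only [hx, if_false] at h0
        exact Or.inl h0
    · exact Or.inr hr

lemma pv_shape_zfold {M N : Nat} (upd : List (List Int) → Nat → List (List Int))
    (hupd : ∀ b x, pvShape M N b → pvShape M N (upd b x)) :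
    ∀ (l : List Nat) (b : List (List Int)), pvShape M N b →
      pvShape M N (l.foldl upd b) := by
  intro l
  induction l with
  | nil => intro b h; exact h
  | cons x l ih => intro b h; exact ih _ (hupd b x h)

-- pvCheck: its Boolean result and its board ------------------------------------
lemma pv_check_snd (arr : List (List String)) (M N i j : Nat) (b : List (List Int)) :
    (pvCheck arr M N i j b).2 =
      (((pvRCnt arr N i : Int) + (pvCCnt arr M j : Int)) == 2) := by
  simp only [pvCheck]
  rw [show (List.foldl (fun st idx => if (arr.getD idx []).getD j "" == "B"
        then (st.1 + 1, pvBSet st.2 idx j 0) else st)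
        (List.foldl (fun st idx => if (arr.getD i []).getD idx "" == "B"
          then (st.1 + 1, pvBSet st.2 i idx 0) else st) ((0 : Int), b) (List.range N))
        (List.range M)).1
      = (0 : Int) + ((List.range N).countP (fun idx => (arr.getD i []).getD idx "" == "B") : Int)
          + ((List.range M).countP (fun idx => (arr.getD idx []).getD j "" == "B") : Int) from by
    rw [pv_foldl_pair_fst _ (fun b idx => pvBSet b idx j 0) (List.range M) _,
        pv_foldl_pair_fst _ (fun b idx => pvBSet b i idx 0) (List.range N) _]]
  unfold pvRCnt pvCCnt pvIsB pvG
  congr 1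
  push_cast
  ring

lemma pv_check_zero (arr : List (List String)) (M N i j p q : Nat) (b : List (List Int))
    (h : pvBGet (pvCheck arr M N i j b).1 p q = 0) :
    pvBGet b p q = 0 ∨ (p = i ∧ pvIsB arr i q = true) ∨ (q = j ∧ pvIsB arr p j = true) := by
  simp only [pvCheck] at h
  rw [pv_foldl_pair_snd (fun idx => (arr.getD idx []).getD j "" == "B")
        (fun b idx => pvBSet b idx j 0),
      pv_foldl_pair_snd (fun idx => (arr.getD i []).getD idx "" == "B")
        (fun b idx => pvBSet b i idx 0)] at h
  rcases pv_zcol_zero (fun p => (arr.getD p []).getD j "" == "B") j p q _ _ h with h2 | h2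
  · rcases pv_zrow_zero (fun q => (arr.getD i []).getD q "" == "B") i p q _ _ h2 with h3 | h3
    · exact Or.inl h3
    · exact Or.inr (Or.inl ⟨h3.1, by simpa [pvIsB, pvG] using h3.2⟩)
  · exact Or.inr (Or.inr ⟨h2.1, by simpa [pvIsB, pvG] using h2.2⟩)

lemma pv_check_shape {M N : Nat} (arr : List (List String)) (i j : Nat)
    {b : List (List Int)} (h : pvShape M N b) :
    pvShape M N (pvCheck arr M N i j b).1 := by
  simp only [pvCheck]
  rw [pv_foldl_pair_snd (fun idx => (arr.getD idx []).getD j "" == "B")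
        (fun b idx => pvBSet b idx j 0),
      pv_foldl_pair_snd (fun idx => (arr.getD i []).getD idx "" == "B")
        (fun b idx => pvBSet b i idx 0)]
  refine pv_shape_zfold _ (fun b x hb => ?_) _ _
      (pv_shape_zfold _ (fun b x hb => ?_) _ _ h) <;>
    · split
      · exact pv_shape_bset hb _ _ _
      · exact hb


-- the uniqueness predicate is monotone in the evidence of a second B -----------
lemma pv_uniq_false_row (arr : List (List String)) (M N : Nat) (c : Nat × Nat)
    (q : Nat) (hq : q < N) (hc : c.2 < N) (hne : q ≠ c.2)
    (hB1 : pvIsB arr c.1 q = true) (hB2 : pvIsB arr c.1 c.2 = true) :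
    pvUniq arr M N c = false := by
  have h2 : 2 ≤ pvRCnt arr N c.1 :=
    pv_two_le_countP _ N q c.2 hq hc hne hB1 hB2
  unfold pvUniq
  have : (pvRCnt arr N c.1 == 1) = false := by
    simp only [beq_eq_false_iff_ne, ne_eq]; omega
  simp [this]

lemma pv_uniq_false_col (arr : List (List String)) (M N : Nat) (c : Nat × Nat)
    (p : Nat) (hp : p < M) (hc : c.1 < M) (hne : p ≠ c.1)
    (hB1 : pvIsB arr p c.2 = true) (hB2 : pvIsB arr c.1 c.2 = true) :
    pvUniq arr M N c = false := by
  have h2 : 2 ≤ pvCCnt arr M c.2 :=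
    pv_two_le_countP _ M p c.1 hp hc hne hB1 hB2
  unfold pvUniq
  have : (pvCCnt arr M c.2 == 1) = false := by
    simp only [beq_eq_false_iff_ne, ne_eq]; omega
  simp [this]

-- the checked cell is counted exactly when it is row- and column-unique --------
lemma pv_check_iff_uniq (arr : List (List String)) (M N : Nat) (c : Nat × Nat)
    (hiM : c.1 < M) (hjN : c.2 < N) (hB : pvIsB arr c.1 c.2 = true)
    (b : List (List Int)) :
    (pvCheck arr M N c.1 c.2 b).2 = pvUniq arr M N c := by
  rw [pv_check_snd]
  have hr1 : 1 ≤ pvRCnt arr N c.1 := by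
    have : 0 < (List.range N).countP (fun q => pvIsB arr c.1 q) :=
      List.countP_pos_iff.mpr ⟨c.2, List.mem_range.mpr hjN, hB⟩
    simpa [pvRCnt] using this
  have hc1 : 1 ≤ pvCCnt arr M c.2 := by
    have : 0 < (List.range M).countP (fun p => pvIsB arr p c.2) :=
      List.countP_pos_iff.mpr ⟨c.1, List.mem_range.mpr hiM, hB⟩
    simpa [pvCCnt] using this
  unfold pvUniq
  rw [hB]
  apply Bool.eq_iff_iff.mpr
  simp only [beq_iff_eq, Bool.and_eq_true, Bool.true_and]
  omega

-- main loop invariant ----------------------------------------------------------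
lemma pv_loop_inv (arr : List (List String)) (M N : Nat) :
    ∀ (rest : List (Nat × Nat)) (b : List (List Int)) (cnt : Int),
      rest.Nodup → (∀ c ∈ rest, c.1 < M ∧ c.2 < N) → pvShape M N b →
      (∀ c ∈ rest, pvBGet b c.1 c.2 = 0 → pvUniq arr M N c = false) →
      (rest.foldl (pvStep arr M N) (b, cnt)).2 =
        cnt + (rest.countP (pvUniq arr M N) : Int) := by
  intro rest
  induction rest with
  | nil => intro b cnt _ _ _ _; simp
  | cons c rest ih =>
    intro b cnt hnd hbound hsh hz
    have hcM := (hbound c (List.mem_cons_self)).1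
    have hcN := (hbound c (List.mem_cons_self)).2
    rw [List.foldl_cons]
    by_cases hB : pvIsB arr c.1 c.2 = true
    · by_cases hg : pvBGet b c.1 c.2 = 0
      · -- skipped: board entry already crossed off, and the cell is not unique
        have hu : pvUniq arr M N c = false := hz c List.mem_cons_self hg
        have hstep : pvStep arr M N (b, cnt) c = (b, cnt) := by
          unfold pvStep
          have : (pvBGet b c.1 c.2 != 0) = false := by simp [hg]
          simp [this]
        rw [hstep, ih b cnt (List.Nodup.of_cons hnd)
              (fun c' hc' => hbound c' (List.mem_cons_of_mem _ hc')) hsh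
              (fun c' hc' => hz c' (List.mem_cons_of_mem _ hc'))]
        simp [List.countP_cons, hu]
      · -- checked
        have hstep : pvStep arr M N (b, cnt) c =
            ((pvCheck arr M N c.1 c.2 b).1,
              cnt + if pvUniq arr M N c then 1 else 0) := by
          unfold pvStep
          have hcond : (((arr.getD c.1 []).getD c.2 "" == "B") &&
              (pvBGet (b, cnt).1 c.1 c.2 != 0)) = true := by
            have hB' : ((arr.getD c.1 []).getD c.2 "" == "B") = true := hB
            rw [Bool.and_eq_true]
            exact ⟨hB', by simp [bne_iff_ne, hg]⟩
          rw [if_pos hcond]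
          show (if (pvCheck arr M N c.1 c.2 b).2 = true
                then ((pvCheck arr M N c.1 c.2 b).1, cnt + 1)
                else ((pvCheck arr M N c.1 c.2 b).1, cnt)) = _
          rw [pv_check_iff_uniq arr M N c hcM hcN hB b]
          by_cases hu : pvUniq arr M N c = true <;> simp [hu]
        rw [hstep, ih _ _ (List.Nodup.of_cons hnd)
              (fun c' hc' => hbound c' (List.mem_cons_of_mem _ hc'))
              (pv_check_shape arr c.1 c.2 hsh) ?_]
        · simp only [List.countP_cons]
          by_cases hu : pvUniq arr M N c = true <;> push_cast [hu] <;> ring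
        · -- zero entries of the new board under unchecked cells are non-unique
          intro c' hc' hz'
          rcases pv_check_zero arr M N c.1 c.2 c'.1 c'.2 b hz' with h0 | hrow | hcol
          · exact hz c' (List.mem_cons_of_mem _ hc') h0
          · by_cases he : c'.2 = c.2
            · exfalso
              have : c' = c := by
                have := hrow.1; exact Prod.ext (by simpa using hrow.1) he
              exact (List.nodup_cons.mp hnd).1 (this ▸ hc')
            · exact pv_uniq_false_row arr M N c' c.2 hcN
                (hbound c' (List.mem_cons_of_mem _ hc')).2 (fun hh => he hh.symm)
                (by rw [hrow.1]; exact hB) (by rw [hrow.1]; exact hrow.2)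
          · by_cases he : c'.1 = c.1
            · exfalso
              have : c' = c := by
                exact Prod.ext he (by simpa using hcol.1)
              exact (List.nodup_cons.mp hnd).1 (this ▸ hc')
            · exact pv_uniq_false_col arr M N c' c.1 hcM
                (hbound c' (List.mem_cons_of_mem _ hc')).1 (fun hh => he hh.symm)
                (by rw [hcol.1]; exact hB) (by rw [hcol.1]; exact hcol.2)
    · -- the cell does not hold a B: skipped, and certainly not unique
      have hBf : pvIsB arr c.1 c.2 = false := Bool.eq_false_iff.mpr hB
      have hu : pvUniq arr M N c = false := by simp [pvUniq, hBf]
      have hstep : pvStep arr M N (b, cnt) c = (b, cnt) := by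
        unfold pvStep
        have hc0 : (((arr.getD c.1 []).getD c.2 "" == "B") &&
            (pvBGet (b, cnt).1 c.1 c.2 != 0)) = false := by
          have : ((arr.getD c.1 []).getD c.2 "" == "B") = false := hBf
          rw [this, Bool.false_and]
        rw [if_neg]
        simp only [Bool.and_eq_true, not_and, bne_iff_ne, ne_eq, not_not, beq_iff_eq]
        intro h
        exfalso
        have h' : (arr.getD c.1 []).getD c.2 "" = "B" := by
          simpa [List.getD_eq_getElem?_getD] using h
        exact Bool.eq_false_iff.mp hBf (beq_iff_eq.mpr h')
      rw [hstep, ih b cnt (List.Nodup.of_cons hnd)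
            (fun c' hc' => hbound c' (List.mem_cons_of_mem _ hc')) hsh
            (fun c' hc' => hz c' (List.mem_cons_of_mem _ hc'))]
      simp [List.countP_cons, hu]


-- A's nested loops as one fold over the list of all cells ----------------------
lemma pv_solution_eq (arr : List (List String)) :
    solution arr = ((pvCells arr.length (arr.headD []).length).foldl
        (pvStep arr arr.length (arr.headD []).length)
        (List.replicate arr.length (List.replicate (arr.headD []).length 1),
          (0 : Int))).2 := by
  unfold solution pvCells
  rw [List.foldl_flatMap]
  simp only [List.foldl_map]
  rfl

lemma pv_cells_nodup (M N : Nat) : (pvCells M N).Nodup := by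
  unfold pvCells
  rw [List.nodup_flatMap]
  constructor
  · intro i _
    exact (List.nodup_range).map (fun a b h => by
      simpa using congrArg Prod.snd h)
  · refine List.Pairwise.imp ?_ (List.pairwise_lt_range)
    intro a b hab
    rw [Function.onFun, List.disjoint_left]
    rintro c hca hcb
    obtain ⟨j1, _, rfl⟩ := List.mem_map.mp hca
    obtain ⟨j2, _, he⟩ := List.mem_map.mp hcb
    exact absurd (congrArg Prod.fst he).symm (by simp; omega)

lemma pv_cells_bound (M N : Nat) (c : Nat × Nat) (h : c ∈ pvCells M N) :
    c.1 < M ∧ c.2 < N := by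
  unfold pvCells at h
  obtain ⟨i, hi, hc⟩ := List.mem_flatMap.mp h
  obtain ⟨j, hj, rfl⟩ := List.mem_map.mp hc
  exact ⟨List.mem_range.mp hi, List.mem_range.mp hj⟩

lemma pv_A_char (arr : List (List String)) :
    solution arr = (((pvCells arr.length (arr.headD []).length).countP
        (pvUniq arr arr.length (arr.headD []).length) : Nat) : Int) := by
  rw [pv_solution_eq,
    pv_loop_inv arr arr.length (arr.headD []).length _ _ 0
      (pv_cells_nodup _ _) (pv_cells_bound _ _)
      ⟨by simp, fun r hr => by rw [List.eq_of_mem_replicate hr]; simp⟩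
      (fun c hc hz => by
        obtain ⟨h1, h2⟩ := pv_cells_bound _ _ c hc
        rw [pvBGet, List.getD_replicate _ h1, List.getD_eq_getElem?_getD,
          List.getElem?_replicate, if_pos h2] at hz
        simp at hz)]
  simp


lemma pv_beq_cast_one (n : Nat) : ((n : Int) == 1) = (n == 1) := by
  by_cases h : n = 1 <;> simp [h]

lemma pv_countP_cells (arr : List (List String)) (M N : Nat) :
    (pvCells M N).countP (pvUniq arr M N) =
      ((List.range M).map (fun i =>
        (List.range N).countP (fun j => pvUniq arr M N (i, j)))).sum := by
  unfold pvCells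
  rw [List.countP_flatMap]
  apply congrArg List.sum
  apply List.map_congr_left
  intro i _
  rw [Function.comp_apply, List.countP_map]
  rfl

-- B-side vocabulary: the per-row test B's loop body performs -------------------
def pvRowP (arr : List (List String)) (row : List String) : Bool :=
  if ((PySem.List.count
        (PySem.List.slice row none (some (((arr.headD []).length : Nat) : Int))) "B" : Nat) : Int) == 1 then
    match PySem.List.index?
        (PySem.List.slice row none (some (((arr.headD []).length : Nat) : Int))) "B" with
    | some j => (arr.foldl (fun (s : Int) r =>
        if r.getD j "" == "B" then s + 1 else s) 0) == 1
    | none => false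
  else false

-- count over row[:n] is the count over column indices < n
lemma pv_slicecnt (row : List String) (n : Nat) (hn : n ≤ row.length) :
    PySem.List.count (row.take n) "B" =
      (List.range n).countP (fun j => row.getD j "" == "B") := by
  rw [PySem.List.count_eq, List.count_eq_countP,
    ← pv_countP_range_getD (row.take n) (fun x => x == "B") "",
    List.length_take_of_le hn]
  apply List.countP_congr
  intro j hj
  have hjn : j < n := List.mem_range.mp hj
  rw [List.getD_eq_getElem?_getD, List.getD_eq_getElem?_getD,
    List.getElem?_take_of_lt hjn]

-- the column-j sum B computes is the column count of the proof vocabulary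
lemma pv_colsum (arr : List (List String)) (j : Nat) :
    (arr.foldl (fun (s : Int) r => if r.getD j "" == "B" then s + 1 else s) 0) =
      ((pvCCnt arr arr.length j : Nat) : Int) := by
  rw [PySem.List.foldl_if_add_one (fun r => r.getD j "" == "B") arr 0, zero_add]
  exact congrArg _ (pv_countP_range_getD arr (fun r => r.getD j "" == "B") []).symm

-- the first "B" of a row prefix holding exactly one "B"
lemma pv_index_char (row : List String) (n : Nat) (hn : n ≤ row.length)
    (h1 : (List.range n).countP (fun j => row.getD j "" == "B") = 1) :
    ∃ k, PySem.List.index? (row.take n) "B" = some k ∧ k < n ∧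
      row.getD k "" = "B" ∧ ∀ j < n, row.getD j "" = "B" → j = k := by
  obtain ⟨j0, hj0mem, hj0p⟩ := List.countP_pos_iff.mp (by rw [h1]; exact Nat.one_pos)
  have hj0n : j0 < n := List.mem_range.mp hj0mem
  have hj0t : j0 < (row.take n).length := by rw [List.length_take_of_le hn]; exact hj0n
  have hB0 : row.getD j0 "" = "B" := beq_iff_eq.mp hj0p
  have hB0' : (row.take n)[j0] = "B" := by
    rw [List.getD_eq_getElem?_getD, ← List.getElem?_take_of_lt hj0n,
      List.getElem?_eq_getElem hj0t] at hB0
    exact hB0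
  have hmem : "B" ∈ row.take n := hB0' ▸ List.getElem_mem hj0t
  obtain ⟨k, hidx⟩ := Option.isSome_iff_exists.mp
    ((PySem.List.index?_isSome_iff (row.take n) "B").mpr hmem)
  obtain ⟨hk, hkB, hfirst⟩ := PySem.List.getElem_of_index?_eq_some hidx
  have hkn : k < n := by
    have := List.length_take_of_le hn
    omega
  have hkB' : row.getD k "" = "B" := by
    rw [List.getD_eq_getElem?_getD, ← List.getElem?_take_of_lt hkn,
      List.getElem?_eq_getElem hk, hkB]
    rfl
  refine ⟨k, hidx, hkn, hkB', ?_⟩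
  intro j hjn hjB
  by_contra hne'
  have hjp : (fun j => row.getD j "" == "B") j = true := beq_iff_eq.mpr hjB
  have := pv_two_le_countP (fun j => row.getD j "" == "B") n j k hjn hkn hne' hjp
    (beq_iff_eq.mpr hkB')
  omega

-- per row: the cells the row-major scan counts in row i, vs B's per-row test ---
lemma pv_row_char (arr : List (List String)) (hne : arr ≠ [])
    (hmin : ∀ row ∈ arr, (arr.headD []).length ≤ row.length) (i : Nat)
    (hi : i < arr.length) :
    (List.range (arr.headD []).length).countP
        (fun j => pvUniq arr arr.length (arr.headD []).length (i, j)) =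
      if pvRowP arr (arr.getD i []) then 1 else 0 := by
  have hrowmem : arr.getD i [] ∈ arr := by
    rw [List.getD_eq_getElem?_getD, List.getElem?_eq_getElem hi]
    exact List.getElem_mem hi
  have hn : (arr.headD []).length ≤ (arr.getD i []).length := hmin _ hrowmem
  unfold pvRowP
  rw [PySem.List.slice_to_natCast, pv_slicecnt _ _ hn]
  by_cases h1 : (List.range (arr.headD []).length).countP
      (fun j => (arr.getD i []).getD j "" == "B") = 1
  · obtain ⟨k, hidx, hkn, hkB, huniq⟩ := pv_index_char _ _ hn h1
    rw [h1, hidx]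
    simp only [Nat.cast_one, beq_self_eq_true, if_true]
    rw [pv_colsum arr k, pv_beq_cast_one]
    have hrc : (pvRCnt arr (arr.headD []).length i == 1) = true := beq_iff_eq.mpr h1
    by_cases hcc : pvCCnt arr arr.length k = 1
    · rw [if_pos (beq_iff_eq.mpr hcc)]
      rw [List.countP_congr (q := fun j => j == k) (fun j hj => ?_)]
      · rw [← List.count_eq_countP,
          List.count_eq_one_of_mem List.nodup_range (List.mem_range.mpr hkn)]
      · have hjn := List.mem_range.mp hj
        show pvUniq arr arr.length (arr.headD []).length (i, j) = true ↔ (j == k) = true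
        by_cases hjk : j = k
        · subst hjk
          constructor
          · intro _; simp
          · intro _
            unfold pvUniq pvIsB pvG
            rw [Bool.and_eq_true, Bool.and_eq_true]
            exact ⟨⟨beq_iff_eq.mpr hkB, hrc⟩, beq_iff_eq.mpr hcc⟩
        · constructor
          · intro hu
            exfalso
            have hB : pvIsB arr i j = true :=
              ((Bool.and_eq_true ..).mp ((Bool.and_eq_true ..).mp hu).1).1
            exact hjk (huniq j hjn (beq_iff_eq.mp hB))
          · intro hjk'
            exact absurd (beq_iff_eq.mp hjk') hjk
    · rw [if_neg (by simp [hcc])]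
      rw [List.countP_eq_zero.mpr (fun j hj hu => ?_)]
      have hjn := List.mem_range.mp hj
      have hB : pvIsB arr i j = true :=
        ((Bool.and_eq_true ..).mp ((Bool.and_eq_true ..).mp hu).1).1
      have hccj : (pvCCnt arr arr.length j == 1) = true := (Bool.and_eq_true ..).mp hu |>.2
      exact hcc (huniq j hjn (beq_iff_eq.mp hB) ▸ beq_iff_eq.mp hccj)
  · have hc : ((((List.range (arr.headD []).length).countP
        (fun j => (arr.getD i []).getD j "" == "B") : Nat) : Int) == 1) = false := by
      rw [pv_beq_cast_one]
      exact beq_eq_false_iff_ne.mpr h1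
    rw [hc, if_neg (by simp)]
    rw [List.countP_eq_zero.mpr (fun j hj hu => ?_)]
    have hrc : (pvRCnt arr (arr.headD []).length i == 1) = true :=
      ((Bool.and_eq_true ..).mp ((Bool.and_eq_true ..).mp hu).1).2
    exact h1 (beq_iff_eq.mp hrc)

lemma pv_B_fold (arr : List (List String)) :
    solution_alt arr = ((arr.countP (pvRowP arr) : Nat) : Int) := by
  have hdef : solution_alt arr = arr.foldl (fun (res : Int) row =>
      if ((PySem.List.count (PySem.List.slice row none
            (some (((arr.headD []).length : Nat) : Int))) "B" : Nat) : Int) == 1 then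
        match PySem.List.index? (PySem.List.slice row none
            (some (((arr.headD []).length : Nat) : Int))) "B" with
        | some j =>
          if (arr.foldl (fun (s : Int) r =>
              if r.getD j "" == "B" then s + 1 else s) 0) == 1
          then res + 1 else res
        | none => res
      else res) 0 := rfl
  rw [hdef]
  rw [show (fun (res : Int) row =>
      if ((PySem.List.count (PySem.List.slice row none
            (some (((arr.headD []).length : Nat) : Int))) "B" : Nat) : Int) == 1 then
        match PySem.List.index? (PySem.List.slice row none
            (some (((arr.headD []).length : Nat) : Int))) "B" with
        | some j =>
          if (arr.foldl (fun (s : Int) r =>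
              if r.getD j "" == "B" then s + 1 else s) 0) == 1
          then res + 1 else res
        | none => res
      else res) = (fun (res : Int) row => if pvRowP arr row then res + 1 else res) from ?_]
  · rw [PySem.List.foldl_if_add_one (pvRowP arr) arr 0, zero_add]
  · funext res row
    unfold pvRowP
    by_cases hcnt : (((PySem.List.count (PySem.List.slice row none
        (some (((arr.headD []).length : Nat) : Int))) "B" : Nat) : Int) == 1) = true
    · rw [if_pos hcnt, if_pos hcnt]
      cases hidx : PySem.List.index? (PySem.List.slice row none
          (some (((arr.headD []).length : Nat) : Int))) "B" with
      | some j =>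
        by_cases hcol : ((arr.foldl (fun (s : Int) r =>
            if r.getD j "" == "B" then s + 1 else s) 0) == 1) = true <;>
          simp [hcol]
      | none => simp
    · rw [if_neg hcnt, if_neg hcnt]
      simp

lemma pv_sum_ite_countP {α : Type} (q : α → Bool) (l : List α) :
    (l.map (fun x => if q x then 1 else 0)).sum = l.countP q := by
  induction l with
  | nil => rfl
  | cons x l ih => by_cases h : q x = true <;> simp [h, ih, List.countP_cons] <;> omega

-- ===== VERDICT (by name: the statement is the Claim_ definition above) =====
theorem solution_spec : Claim_equal_solution := by
  intro arr _ hpre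
  show solution arr = solution_alt arr
  rw [pv_A_char, pv_B_fold arr, pv_countP_cells]
  apply congrArg
  rw [List.map_congr_left
      (fun i hi => pv_row_char arr hpre.1 hpre.2 i (List.mem_range.mp hi)),
    pv_sum_ite_countP (fun i => pvRowP arr (arr.getD i [])) (List.range arr.length),
    pv_countP_range_getD arr (pvRowP arr) []]
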